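-- pv_equiv track=rewrite | github.com/qiaosun22/BayesMultiOpenPCDet | BayesFT/assets/FTNA.py | all_Combination_Bits
-- ===== SOURCE A (Python) =====
-- import itertools
--
-- def all_Combination_Bits(bit_len):
--     result = []
--     # Iterate for probable 0-0s 1-0s 2-0s till 4-0s for bit_length of 4
--     for i in range(bit_len + 1):
--         # Iterate for combinations
--         for j in itertools.combinations(range(bit_len), i):
--             s = ['0'] * bit_len
--             # j would be a tuple
--             # Iterate through the combination (j) to set the position to be 1
--             for k in j:
--                 s[k] = '1'
--             result.append(''.join(s))
--     return result
-- ===== SOURCE B (Python) =====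
-- def all_Combination_Bits(bit_len):
--     # Alternative decomposition: build the popcount groups of length-m strings
--     # iteratively (prepend '1' to the previous group i-1, then '0' to group i),
--     # instead of materialising every combination of one-positions.
--     # Invariant: after m rounds, groups[i] = all length-m bit strings with
--     # exactly i ones, in descending order as binary numbers (= A's order).
--     if bit_len < 0:
--         return []  # there are no bit strings of negative length
--     groups = [['']]
--     for m in range(bit_len):
--         prev = groups
--         groups = []
--         for i in range(m + 2):
--             g = []
--             if i > 0:
--                 g += ['1' + s for s in prev[i - 1]]
--             if i <= m:
--                 g += ['0' + s for s in prev[i]]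
--             groups.append(g)
--     return [s for g in groups for s in g]
-- ===== Notes on version B (the rewrite author's own statement) =====
-- stated objective: alternative
-- what changed: Replaces the itertools.combinations enumeration of one-positions (with per-combination list mutation and join) by an iterative construction of the popcount groups, at each length step prepending a set bit to the previous group and a clear bit to the same-index group, which yields A's descending-binary order within each group.
import Mathlib
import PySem

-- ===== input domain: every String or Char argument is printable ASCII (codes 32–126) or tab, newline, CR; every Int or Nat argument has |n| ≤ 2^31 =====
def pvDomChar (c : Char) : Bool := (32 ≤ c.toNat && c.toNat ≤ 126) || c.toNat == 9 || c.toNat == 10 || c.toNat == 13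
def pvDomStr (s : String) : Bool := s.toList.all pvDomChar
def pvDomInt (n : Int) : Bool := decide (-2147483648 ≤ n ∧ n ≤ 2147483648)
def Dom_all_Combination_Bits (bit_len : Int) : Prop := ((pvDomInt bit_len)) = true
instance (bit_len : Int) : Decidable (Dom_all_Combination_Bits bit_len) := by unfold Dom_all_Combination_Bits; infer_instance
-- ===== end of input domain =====

-- B re-implements A by a recursive popcount-group construction instead of enumerating
-- combinations of one-positions; same return value on every int input (both total).

-- ===== PORT A =====
-- itertools.combinations(xs, k) in lexicographic order (exact transliteration of its spec)
def pyCombinations : List Int → Nat → List (List Int)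
  | _, 0 => [[]]
  | [], _+1 => []
  | x :: rest, k+1 =>
      (pyCombinations rest k).map (fun c => x :: c) ++ pyCombinations rest (k+1)

-- i from range(bit_len+1) and k from a combination of range(bit_len) are nonnegative,
-- so .toNat is exact there; ['0']*bit_len is [] for negative bit_len, like replicate .toNat.
def all_Combination_Bits (bit_len : Int) : List String :=
  (PySem.List.pyRange 0 (bit_len + 1) 1).foldl (fun result i =>
    (pyCombinations (PySem.List.pyRange 0 bit_len 1) i.toNat).foldl (fun result j =>
      result ++ [String.mk (j.foldl (fun s k => s.set k.toNat '1') (List.replicate bit_len.toNat '0'))])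
      result) []

-- ===== PORT B =====
-- Source B's loop building `groups`; Python str values are carried as their char
-- lists (the PySem convention: string facts live on the List Char side), so
-- '1' + s is '1' :: s — exact. `groups.append(g)` over range(m+2) is the map.
def bGroups (n : Nat) : List (List (List Char)) :=
  (List.range n).foldl (fun prev m =>
    (List.range (m+2)).map (fun i =>
      (if 0 < i then (prev.getD (i-1) []).map (fun s => '1' :: s) else []) ++
      (if i ≤ m then (prev.getD i []).map (fun s => '0' :: s) else []))) [[[]]]

def all_Combination_Bits_alt (bit_len : Int) : List String :=
  if bit_len < 0 then []
  else ((bGroups bit_len.toNat).flatten).map (fun s => String.mk s)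

-- ===== PRECONDITION & SPEC =====
def Spec_all_Combination_Bits (bit_len : Int) (out : List String) : Prop := out = all_Combination_Bits_alt bit_len
instance (bit_len : Int) (out : List String) : Decidable (Spec_all_Combination_Bits bit_len out) := by unfold Spec_all_Combination_Bits; infer_instance

-- ===== CLAIM (what is proved, stated in full; the proofs are below) =====
def Claim_equal_all_Combination_Bits : Prop := ∀ (bit_len : Int), Dom_all_Combination_Bits bit_len → Spec_all_Combination_Bits bit_len (all_Combination_Bits bit_len)

-- ===== LEMMAS AND PROOFS =====

-- A's inner construction: the bit string of a combination
def sOf (n : Nat) (j : List Int) : List Char :=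
  j.foldl (fun s k => s.set k.toNat '1') (List.replicate n '0')

theorem mem_pyCombinations (xs : List Int) (k : Nat) (c : List Int)
    (hc : c ∈ pyCombinations xs k) : ∀ a ∈ c, a ∈ xs := by
  induction xs generalizing k c with
  | nil =>
    cases k with
    | zero => simp [pyCombinations] at hc; simp [hc]
    | succ k => simp [pyCombinations] at hc
  | cons x rest ih =>
    cases k with
    | zero => simp [pyCombinations] at hc; simp [hc]
    | succ k =>
      simp only [pyCombinations, List.mem_append, List.mem_map] at hc
      rcases hc with ⟨c', hc', rfl⟩ | hc
      · intro a ha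
        rcases List.mem_cons.1 ha with rfl | ha
        · exact List.mem_cons_self
        · exact List.mem_cons_of_mem _ (ih k c' hc' a ha)
      · intro a ha
        exact List.mem_cons_of_mem _ (ih (k+1) c hc a ha)

theorem pyCombinations_map (xs : List Int) (f : Int → Int) (k : Nat) :
    pyCombinations (xs.map f) k = (pyCombinations xs k).map (List.map f) := by
  induction xs generalizing k with
  | nil => cases k <;> rfl
  | cons x rest ih =>
    cases k with
    | zero => rfl
    | succ k =>
      simp only [List.map_cons, pyCombinations, ih, List.map_append, List.map_map]
      rfl

theorem foldl_set_map_succ (j : List Int) (c : Char) (s : List Char)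
    (hj : ∀ a ∈ j, 0 ≤ a) :
    (j.map (· + 1)).foldl (fun s k => s.set k.toNat '1') (c :: s) =
      c :: j.foldl (fun s k => s.set k.toNat '1') s := by
  induction j generalizing s with
  | nil => rfl
  | cons a t ih =>
    have ha : 0 ≤ a := hj a List.mem_cons_self
    have : (a + 1).toNat = a.toNat + 1 := by omega
    simp only [List.map_cons, List.foldl_cons, this, List.set_cons_succ]
    exact ih _ (fun b hb => hj b (List.mem_cons_of_mem _ hb))

theorem sOf_shift (n : Nat) (j : List Int) (hj : ∀ a ∈ j, 0 ≤ a) :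
    sOf (n+1) (j.map (· + 1)) = '0' :: sOf n j := by
  simp only [sOf, List.replicate_succ]
  exact foldl_set_map_succ j '0' _ hj

theorem sOf_cons_zero (n : Nat) (j : List Int) (hj : ∀ a ∈ j, 0 ≤ a) :
    sOf (n+1) (0 :: j.map (· + 1)) = '1' :: sOf n j := by
  simp only [sOf, List.foldl_cons, List.replicate_succ, Int.toNat_zero, List.set_cons_zero]
  exact foldl_set_map_succ j '1' _ hj

theorem pyRange_succ_shift (n : Nat) :
    PySem.List.pyRange 0 ((n : Int) + 1) 1 =
      0 :: (PySem.List.pyRange 0 (n : Int) 1).map (· + 1) := by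
  rw [PySem.List.pyRange_one, PySem.List.pyRange_one]
  have h1 : (((n : Int) + 1) - 0).toNat = n + 1 := by omega
  have h2 : (((n : Int)) - 0).toNat = n := by omega
  rw [h1, h2, List.range_succ_eq_map, List.map_cons, List.map_map, List.map_map]
  refine congrArg₂ _ (by norm_num) ?_
  exact List.map_congr_left (fun k _ => by simp only [Function.comp_apply]; push_cast; omega)

theorem bGroups_succ (n : Nat) :
    bGroups (n+1) = (List.range (n+2)).map (fun i =>
      (if 0 < i then ((bGroups n).getD (i-1) []).map (fun s => '1' :: s) else []) ++
      (if i ≤ n then ((bGroups n).getD i []).map (fun s => '0' :: s) else [])) := by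
  unfold bGroups
  rw [List.range_succ, List.foldl_append]
  rfl

theorem bGroups_length (n : Nat) : (bGroups n).length = n + 1 := by
  cases n with
  | zero => rfl
  | succ m => rw [bGroups_succ]; simp

theorem getD_map_range' {A : Type} (f : Nat → A) (m j : Nat) (d : A) (h : j < m) :
    ((List.range m).map f).getD j d = f j := by
  simp [List.getD, h]

theorem main_lemma (n : Nat) (i : Nat) :
    (pyCombinations (PySem.List.pyRange 0 (n : Int) 1) i).map (sOf n) =
      (bGroups n).getD i [] := by
  induction n generalizing i with
  | zero =>
    rw [PySem.List.pyRange_one_eq_nil (by norm_num)]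
    cases i with
    | zero => rfl
    | succ i => cases i <;> rfl
  | succ n ih =>
    rw [show (((n+1 : Nat)) : Int) = (n : Int) + 1 by push_cast; ring, pyRange_succ_shift n]
    have hR : ∀ a ∈ PySem.List.pyRange 0 (n : Int) 1, 0 ≤ a :=
      fun a ha => (PySem.List.mem_pyRange_one.mp ha).1
    cases i with
    | zero =>
      have h0 : (bGroups (n+1)).getD 0 [] =
          ((bGroups n).getD 0 []).map (fun s => '0' :: s) := by
        rw [bGroups_succ, getD_map_range' _ _ _ _ (by omega)]
        simp
      rw [h0, ← ih 0]
      simp [pyCombinations, sOf, List.replicate_succ]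
    | succ i =>
      have hL : (pyCombinations (0 :: (PySem.List.pyRange 0 (n:Int) 1).map (· + 1)) (i+1)).map (sOf (n+1))
          = ((bGroups n).getD i []).map (fun s => '1' :: s)
            ++ ((bGroups n).getD (i+1) []).map (fun s => '0' :: s) := by
        simp only [pyCombinations, pyCombinations_map, List.map_append, List.map_map]
        rw [← ih i, ← ih (i+1)]
        simp only [List.map_map]
        refine congrArg₂ _ ?_ ?_
        · exact List.map_congr_left (fun c hc => by
            simp only [Function.comp_apply]
            exact sOf_cons_zero n c
              (fun a ha => hR a (mem_pyCombinations _ _ _ hc a ha)))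
        · exact List.map_congr_left (fun c hc => by
            simp only [Function.comp_apply]
            exact sOf_shift n c
              (fun a ha => hR a (mem_pyCombinations _ _ _ hc a ha)))
      rw [hL]
      by_cases h1 : i < n
      · rw [bGroups_succ, getD_map_range' _ _ _ _ (by omega)]
        simp [Nat.succ_le_of_lt h1]
      · by_cases h2 : i = n
        · rw [h2]
          have he : (bGroups n).getD (n+1) [] = [] :=
            List.getD_eq_default _ _ (by rw [bGroups_length])
          rw [bGroups_succ, getD_map_range' _ _ _ _ (by omega), he]
          simp
        · have hi : n + 1 ≤ i := by omega
          have e1 : (bGroups n).getD i [] = [] :=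
            List.getD_eq_default _ _ (by rw [bGroups_length]; omega)
          have e2 : (bGroups n).getD (i+1) [] = [] :=
            List.getD_eq_default _ _ (by rw [bGroups_length]; omega)
          have e3 : (bGroups (n+1)).getD (i+1) [] = [] := by
            apply List.getD_eq_default
            rw [bGroups_length]
            omega
          rw [e1, e2, e3]
          simp

theorem main_lemma' (n i : Nat) :
    (pyCombinations (PySem.List.pyRange 0 (n : Int) 1) i).map
      (fun j => String.mk (j.foldl (fun s k => s.set k.toNat '1') (List.replicate n '0'))) =
    ((bGroups n).getD i []).map (fun s => String.mk s) := by
  have h := congrArg (List.map (fun s => String.mk s)) (main_lemma n i)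
  simpa [List.map_map, Function.comp_def, sOf] using h

theorem map_getD_range {A : Type} (l : List A) (d : A) :
    (List.range l.length).map (fun k => l.getD k d) = l := by
  induction l with
  | nil => rfl
  | cons x t ih =>
    rw [List.length_cons, List.range_succ_eq_map, List.map_cons, List.map_map]
    simp only [List.getD_cons_zero, Function.comp_def, List.getD_cons_succ]
    rw [ih]

theorem all_Combination_Bits_spec : Claim_equal_all_Combination_Bits := by
  intro bit_len _
  unfold Spec_all_Combination_Bits all_Combination_Bits all_Combination_Bits_alt
  by_cases hneg : bit_len < 0
  · rw [if_pos hneg,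
      show PySem.List.pyRange 0 (bit_len + 1) 1 = [] from PySem.List.pyRange_one_eq_nil (by omega)]
    rfl
  · rw [if_neg hneg]
    obtain ⟨n, rfl⟩ : ∃ m : Nat, bit_len = (m : Int) :=
      ⟨bit_len.toNat, (Int.toNat_of_nonneg (by omega)).symm⟩
    simp only [Int.toNat_natCast]
    simp only [PySem.List.foldl_append_singleton_eq_map]
    have hpr : PySem.List.pyRange 0 ((n : Int) + 1) 1 = (List.range (n+1)).map (fun k : Nat => (k : Int)) := by
      rw [PySem.List.pyRange_one, show (((n : Int) + 1) - 0).toNat = n + 1 by omega]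
      exact List.map_congr_left (fun k _ => by omega)
    rw [PySem.List.foldl_append_eq_flatMap, List.nil_append, hpr, List.flatMap_def, List.map_map]
    simp only [Function.comp_def, main_lemma']
    have hbase : (List.range (n+1)).map (fun k => (bGroups n).getD k []) = bGroups n := by
      have h := map_getD_range (bGroups n) []
      rwa [bGroups_length] at h
    rw [List.map_flatten, ← hbase, List.map_map]
    refine congrArg List.flatten (List.map_congr_left (fun x hx => ?_))
    have hx' : x < n + 1 := List.mem_range.mp hx
    simp [List.getD, hx']
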